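-- pv_equiv track=rewrite | github.com/Jccasav14/IO_Project | backend/src/core/lp/two_phase.py | _map_basis_after_removal
-- ===== SOURCE A (Python) =====
-- from typing import List, Tuple, Optional
--
-- def _map_basis_after_removal(basis: List[int], remove_cols: List[int]) -> List[int]:
--     remove_cols = sorted(remove_cols)
--     remove_set = set(remove_cols)
--     def new_index(old: int) -> int:
--         shift = 0
--         for c in remove_cols:
--             if c < old:
--                 shift += 1
--         return old - shift
--     nb = []
--     for b in basis:
--         if b in remove_set:
--             nb.append(-1)
--         else:
--             nb.append(new_index(b))
--     return nb
-- ===== SOURCE B (Python) =====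
-- from typing import List
--
-- def _map_basis_after_removal(basis: List[int], remove_cols: List[int]) -> List[int]:
--     rs = sorted(remove_cols)
--     out = [0] * len(basis)
--     j = 0
--     for i, b in sorted(enumerate(basis), key=lambda p: p[1]):
--         while j < len(rs) and rs[j] < b:
--             j += 1
--         out[i] = -1 if j < len(rs) and rs[j] == b else b - j
--     return out
-- ===== Notes on version B (the rewrite author's own statement) =====
-- stated objective: faster
-- what changed: B sorts (position, value) pairs of basis and merges them against sorted remove_cols with one shared pointer that advances monotonically, scattering each answer back to its original position, so the per-element scan/count of remove_cols disappears entirely.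
import Mathlib
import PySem

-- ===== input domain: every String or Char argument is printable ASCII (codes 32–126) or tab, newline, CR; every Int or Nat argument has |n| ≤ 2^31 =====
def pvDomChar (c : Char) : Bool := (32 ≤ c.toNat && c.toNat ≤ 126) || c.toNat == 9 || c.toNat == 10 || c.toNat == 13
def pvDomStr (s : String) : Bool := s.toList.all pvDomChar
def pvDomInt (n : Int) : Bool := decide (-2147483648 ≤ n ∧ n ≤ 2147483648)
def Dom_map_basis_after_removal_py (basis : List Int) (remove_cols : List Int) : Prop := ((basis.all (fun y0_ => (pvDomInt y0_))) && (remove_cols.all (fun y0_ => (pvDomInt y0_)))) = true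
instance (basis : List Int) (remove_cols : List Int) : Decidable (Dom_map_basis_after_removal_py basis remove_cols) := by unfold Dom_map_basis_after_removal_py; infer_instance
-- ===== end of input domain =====

-- B replaces A's per-element scan of remove_cols by a sort-merge: it sorts the (position, value)
-- pairs of basis, sweeps one shared pointer through sorted remove_cols, and scatters each answer
-- back to its original position.

-- ===== PORT A =====
def map_basis_after_removal_py (basis : List Int) (remove_cols : List Int) : List Int :=
  let rcs := PySem.List.sorted remove_cols (fun x => x) false
  let rset := PySem.Set.ofList rcs
  let newIndex : Int → Int := fun old =>
    old - rcs.foldl (fun shift c => if c < old then shift + 1 else shift) 0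
  basis.foldl (fun nb b => nb ++ [if PySem.Set.contains rset b then -1 else newIndex b]) []

-- ===== PORT B =====
-- Source B's inner 'while j < len(rs) and rs[j] < b: j += 1' — the pointer j is kept as
-- (remaining suffix of rs, j); structural recursion on the suffix.
def altSkip : List Int → Int → Int → (List Int × Int)
  | [], _, j => ([], j)
  | c :: t, b, j => if c < b then altSkip t b (j + 1) else (c :: t, j)

-- Source B's '-1 if j < len(rs) and rs[j] == b else b - j' on the suffix left by altSkip
def altVal : List Int → Int → Int → Int
  | c :: _, b, j => if c == b then -1 else b - j
  | [], b, j => b - j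

-- Source B's 'for i, b in sorted(enumerate(basis), key=...)' loop, carrying (rs-suffix, j, out)
def altLoop : List (Int × Int) → List Int → Int → List Int → List Int
  | [], _, _, out => out
  | (i, b) :: rest, rs, j, out =>
      let p := altSkip rs b j
      altLoop rest p.1 p.2 (out.set i.toNat (altVal p.1 b p.2))

def map_basis_after_removal_py_alt (basis : List Int) (remove_cols : List Int) : List Int :=
  let rs := PySem.List.sorted remove_cols (fun x => x) false
  altLoop (PySem.List.sorted (PySem.List.enumerate basis 0) (fun p => p.2) false)
    rs 0 (List.replicate basis.length 0)

-- ===== PRECONDITION & SPEC =====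
def Spec_map_basis_after_removal_py (basis : List Int) (remove_cols : List Int) (out : List Int) : Prop := out = map_basis_after_removal_py_alt basis remove_cols
instance (basis : List Int) (remove_cols : List Int) (out : List Int) : Decidable (Spec_map_basis_after_removal_py basis remove_cols out) := by unfold Spec_map_basis_after_removal_py; infer_instance

-- ===== CLAIM (what is proved, stated in full; the proofs are below) =====
def Claim_equal_map_basis_after_removal_py : Prop := ∀ (basis : List Int) (remove_cols : List Int), Dom_map_basis_after_removal_py basis remove_cols → Spec_map_basis_after_removal_py basis remove_cols (map_basis_after_removal_py basis remove_cols)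

-- ===== LEMMAS AND PROOFS =====

-- the common value both programs compute for one basis entry, relative to sorted remove_cols
def remapVal (rs0 : List Int) (b : Int) : Int :=
  if b ∈ rs0 then -1 else b - (rs0.countP (fun c => decide (c < b)) : Int)

theorem altSkip_eq (b : Int) : ∀ (rs : List Int) (j : Int),
    altSkip rs b j = (rs.dropWhile (fun c => decide (c < b)),
                      j + ((rs.takeWhile (fun c => decide (c < b))).length : Int)) := by
  intro rs
  induction rs with
  | nil => intro j; simp [altSkip]
  | cons c t ih =>
    intro j
    by_cases h : c < b
    · simp [altSkip, h, ih]; ring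
    · simp [altSkip, h]

theorem remapVal_step (pre rs : List Int) (b : Int)
    (hs : (pre ++ rs).Pairwise (· ≤ ·)) (hpre : ∀ c ∈ pre, c < b) :
    altVal (rs.dropWhile (fun c => decide (c < b))) b
        ((pre.length : Int) + ((rs.takeWhile (fun c => decide (c < b))).length : Int))
    = remapVal (pre ++ rs) b := by
  have htw : ∀ c ∈ rs.takeWhile (fun c => decide (c < b)), c < b := by
    intro c hc; simpa using List.mem_takeWhile_imp hc
  have hsplit : rs.takeWhile (fun c => decide (c < b)) ++ rs.dropWhile (fun c => decide (c < b)) = rs :=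
    List.takeWhile_append_dropWhile
  have hcount_pre : pre.countP (fun c => decide (c < b)) = pre.length :=
    List.countP_eq_length.mpr (by intro c hc; simpa using hpre c hc)
  have hcount_tw : (rs.takeWhile (fun c => decide (c < b))).countP (fun c => decide (c < b))
      = (rs.takeWhile (fun c => decide (c < b))).length :=
    List.countP_eq_length.mpr (by intro c hc; simpa using htw c hc)
  have hdw_sorted : (rs.dropWhile (fun c => decide (c < b))).Pairwise (· ≤ ·) := by
    have h1 : rs.Pairwise (· ≤ ·) := (List.pairwise_append.mp hs).2.1
    exact h1.sublist (List.dropWhile_sublist _)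
  cases hdw : rs.dropWhile (fun c => decide (c < b)) with
  | nil =>
    have hmem : b ∉ pre ++ rs := by
      intro hm
      rcases List.mem_append.mp hm with h | h
      · exact absurd (hpre b h) (lt_irrefl b)
      · rw [← hsplit] at h
        rcases List.mem_append.mp h with h' | h'
        · exact absurd (htw b h') (lt_irrefl b)
        · simp [hdw] at h'
    have hcount : (pre ++ rs).countP (fun c => decide (c < b))
        = pre.length + (rs.takeWhile (fun c => decide (c < b))).length := by
      conv_lhs => rw [← hsplit]
      rw [List.countP_append, List.countP_append, hcount_pre, hcount_tw, hdw]
      simp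
    simp only [remapVal, if_neg hmem, hcount, altVal]
    push_cast
    ring
  | cons h0 t0 =>
    have hh0 : ¬ h0 < b := by
      have := List.head?_dropWhile_not (fun c => decide (c < b)) rs
      rw [hdw] at this; simpa using this
    by_cases heq : h0 = b
    · have hmem : b ∈ pre ++ rs := by
        apply List.mem_append.mpr; right
        rw [← hsplit]
        apply List.mem_append.mpr; right
        rw [hdw]; simp [heq]
      simp [altVal, remapVal, heq, hmem]
    · have hgt : b < h0 := by omega
      have ht0 : ∀ x ∈ t0, h0 ≤ x := by
        rw [hdw] at hdw_sorted
        exact (List.pairwise_cons.mp hdw_sorted).1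
      have hmem : b ∉ pre ++ rs := by
        intro hm
        rcases List.mem_append.mp hm with h | h
        · exact absurd (hpre b h) (lt_irrefl b)
        · rw [← hsplit] at h
          rcases List.mem_append.mp h with h' | h'
          · exact absurd (htw b h') (lt_irrefl b)
          · rw [hdw] at h'
            rcases List.mem_cons.mp h' with h'' | h''
            · omega
            · have := ht0 b h''; omega
      have hcount_dw : (rs.dropWhile (fun c => decide (c < b))).countP (fun c => decide (c < b)) = 0 := by
        rw [List.countP_eq_zero, hdw]
        intro x hx
        rcases List.mem_cons.mp hx with h' | h'
        · subst h'; simpa using (by omega : ¬ x < b)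
        · have := ht0 x h'; simpa using (by omega : ¬ x < b)
      have hcount : (pre ++ rs).countP (fun c => decide (c < b))
          = pre.length + (rs.takeWhile (fun c => decide (c < b))).length := by
        conv_lhs => rw [← hsplit]
        rw [List.countP_append, List.countP_append, hcount_pre, hcount_tw, hcount_dw]
        omega
      have hne : (h0 == b) = false := by simp [heq]
      simp only [remapVal, if_neg hmem, hcount, altVal, hne, Bool.false_eq_true, if_false]
      push_cast
      ring

theorem altLoop_eq_foldl (rs0 : List Int) (hs0 : rs0.Pairwise (· ≤ ·)) :
    ∀ (pairs : List (Int × Int)) (pre rs : List Int) (out : List Int),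
    pre ++ rs = rs0 →
    pairs.Pairwise (fun p q => p.2 ≤ q.2) →
    (∀ p ∈ pairs, ∀ c ∈ pre, c < p.2) →
    altLoop pairs rs (pre.length : Int) out
      = pairs.foldl (fun o p => o.set p.1.toNat (remapVal rs0 p.2)) out := by
  intro pairs
  induction pairs with
  | nil => intro pre rs out _ _ _; simp [altLoop]
  | cons p rest ih =>
    intro pre rs out hsplit hpw hpre
    obtain ⟨i, b⟩ := p
    have hs : (pre ++ rs).Pairwise (· ≤ ·) := by rw [hsplit]; exact hs0
    have hpreb : ∀ c ∈ pre, c < b := fun c hc => hpre (i, b) List.mem_cons_self c hc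
    rw [List.foldl_cons, altLoop, altSkip_eq]
    show altLoop rest (rs.dropWhile (fun c => decide (c < b)))
        ((pre.length : Int) + ((rs.takeWhile (fun c => decide (c < b))).length : Int))
        (out.set i.toNat (altVal (rs.dropWhile (fun c => decide (c < b))) b
          ((pre.length : Int) + ((rs.takeWhile (fun c => decide (c < b))).length : Int)))) = _
    rw [remapVal_step pre rs b hs hpreb, hsplit]
    rw [show (pre.length : Int) + ((rs.takeWhile (fun c => decide (c < b))).length : Int)
        = (((pre ++ rs.takeWhile (fun c => decide (c < b))).length : Nat) : Int) by simp]
    exact ih (pre ++ rs.takeWhile (fun c => decide (c < b)))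
      (rs.dropWhile (fun c => decide (c < b)))
      (out.set i.toNat (remapVal rs0 b))
      (by rw [List.append_assoc, List.takeWhile_append_dropWhile]; exact hsplit)
      ((List.pairwise_cons.mp hpw).2)
      (by
        intro q hq c hc
        have hbq : b ≤ q.2 := (List.pairwise_cons.mp hpw).1 q hq
        rcases List.mem_append.mp hc with h | h
        · exact lt_of_lt_of_le (hpreb c h) hbq
        · have : c < b := by simpa using List.mem_takeWhile_imp h
          omega)

-- scatter: if every pair writes the target's value at its (in-range) position and every
-- position is either written or already correct, the fold of set produces the target
theorem foldl_set_eq_target (g : Int → Int) :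
    ∀ (pairs : List (Int × Int)) (out target : List Int),
    out.length = target.length →
    (∀ p ∈ pairs, 0 ≤ p.1 ∧ p.1.toNat < target.length ∧ target[p.1.toNat]? = some (g p.2)) →
    (∀ k, k < target.length → (∃ p ∈ pairs, p.1.toNat = k) ∨ out[k]? = target[k]?) →
    pairs.foldl (fun o p => o.set p.1.toNat (g p.2)) out = target := by
  intro pairs
  induction pairs with
  | nil =>
    intro out target hlen _ hcov
    rw [List.foldl_nil]
    apply List.ext_getElem?
    intro k
    by_cases hk : k < target.length
    · rcases hcov k hk with ⟨p, hp, _⟩ | h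
      · exact absurd hp (List.not_mem_nil)
      · exact h
    · rw [List.getElem?_eq_none (by omega), List.getElem?_eq_none (by omega)]
  | cons p rest ih =>
    intro out target hlen hval hcov
    obtain ⟨hp0, hplt, hpv⟩ := hval p List.mem_cons_self
    rw [List.foldl_cons]
    apply ih (out.set p.1.toNat (g p.2)) target
    · simp [hlen]
    · intro q hq; exact hval q (List.mem_cons_of_mem _ hq)
    · intro k hk
      by_cases hkp : k = p.1.toNat
      · right
        subst hkp
        rw [List.getElem?_set_self (by omega), hpv]
      · rcases hcov k hk with ⟨q, hq, hqk⟩ | h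
        · rcases List.mem_cons.mp hq with h' | h'
          · exact absurd (h' ▸ hqk).symm hkp
          · exact Or.inl ⟨q, h', hqk⟩
        · right
          rw [List.getElem?_set_ne (by omega)]
          exact h

theorem portA_eq_map (basis remove_cols : List Int) :
    map_basis_after_removal_py basis remove_cols
      = basis.map (remapVal (PySem.List.sorted remove_cols (fun x => x) false)) := by
  unfold map_basis_after_removal_py
  rw [PySem.List.foldl_append_singleton_eq_map, List.nil_append]
  apply List.map_congr_left
  intro b _
  have hcnt := PySem.List.foldl_ite_add_one
    (l := PySem.List.sorted remove_cols (fun x => x) false) (p := fun c => c < b) (a := (0 : Int))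
  by_cases hm : b ∈ PySem.List.sorted remove_cols (fun x => x) false
  · simp [remapVal, hm]
  · simp [remapVal, hm, hcnt]

-- ===== VERDICT (by name: the statement is the Claim_ definition above) =====
theorem map_basis_after_removal_py_spec : Claim_equal_map_basis_after_removal_py := by
  intro basis remove_cols _
  unfold Spec_map_basis_after_removal_py map_basis_after_removal_py_alt
  rw [portA_eq_map]
  set rs := PySem.List.sorted remove_cols (fun x => x) false with hrs
  set pairs := PySem.List.sorted (PySem.List.enumerate basis 0) (fun p => p.2) false with hpairs
  have hperm : pairs.Perm (PySem.List.enumerate basis 0) := PySem.List.sorted_perm _ _ _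
  have hloop := altLoop_eq_foldl rs (by simpa using PySem.List.sorted_pairwise remove_cols (fun x => x))
    pairs [] rs (List.replicate basis.length 0) (by simp)
    (by simpa using PySem.List.sorted_pairwise (PySem.List.enumerate basis 0) (fun p => p.2))
    (by intro p _ c hc; exact absurd hc (List.not_mem_nil))
  simp only [List.length_nil, Int.natCast_zero] at hloop
  rw [hloop]
  refine (foldl_set_eq_target (remapVal rs) pairs (List.replicate basis.length 0)
    (basis.map (remapVal rs)) (by simp) ?_ ?_).symm
  · intro p hp
    have hp' : p ∈ PySem.List.enumerate basis 0 := hperm.mem_iff.mp hp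
    rcases (PySem.List.mem_enumerate_iff _ _ _).mp hp' with ⟨k, hk, rfl⟩
    refine ⟨by simp, by simpa using hk, ?_⟩
    simp [List.getElem?_map, List.getElem?_eq_getElem hk]
  · intro k hk
    left
    have hk' : k < basis.length := by simpa using hk
    refine ⟨((k : Int), basis[k]'hk'), ?_, by simp⟩
    rw [hperm.mem_iff, PySem.List.mem_enumerate_iff _ _ _]
    exact ⟨k, hk', by simp⟩
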